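-- pv_equiv track=rewrite | github.com/KwonTaeyong/Python_v7 | learning39.py | solution
-- ===== SOURCE A (Python) =====
-- def solution(n, cores):
--     if n <= len(cores):
--         return n  # 처음 n개는 코어 순서대로 할당됨
--
--     def count_jobs_done(time):
--         # 주어진 시간까지 처리된 총 작업 수
--         return sum((time // core) + 1 for core in cores)
--
--     left = 0
--     right = max(cores) * n
--     time_point = 0
--
--     while left <= right:
--         mid = (left + right) // 2
--         total = count_jobs_done(mid)
--         if total >= n:
--             time_point = mid
--             right = mid - 1
--         else:
--             left = mid + 1
--
--     # time_point 시점 이전까지 처리된 작업 수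
--     work_done_before = sum((time_point - 1) // core + 1 for core in cores)
--     remaining = n - work_done_before
--
--     for idx, core in enumerate(cores):
--         if time_point % core == 0:
--             remaining -= 1
--             if remaining == 0:
--                 return idx + 1  # 코어 번호는 1부터 시작
-- ===== SOURCE B (Python) =====
-- def solution(n, cores):
--     m = len(cores)
--     if n <= m:
--         return n  # first n jobs go to cores in order
--     N = n - m  # jobs handed out after time 0
--     # exact harmonic bounds: with H = sum(1/c) (as the fraction W/D),
--     # S(t) = sum(t//c) satisfies t*H - m < S(t) <= t*H, so the time T of the
--     # N-th post-zero hand-out lies in [ceil(N/H), ceil((N+m)/H)]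
--     D = 1
--     for c in cores:
--         D *= c
--     W = sum(D // c for c in cores)
--     lo = (N * D + W - 1) // W
--     hi = ((N + m) * D + W - 1) // W
--     # T is a multiple of some core, and it is the unique candidate in [lo, hi]
--     # whose running totals straddle N: scan the few candidates directly
--     T = hi
--     for t in (c * k for c in cores
--               for k in range((lo + c - 1) // c, hi // c + 1)):
--         if sum(t // c for c in cores) >= N and sum((t - 1) // c for c in cores) < N:
--             T = t
--             break
--     # award the cores finishing at T in core order, counting up to n
--     done = m + sum((T - 1) // c for c in cores)
--     for i, c in enumerate(cores):
--         if T % c == 0: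
--             done += 1
--             if done == n:
--                 return i + 1
-- ===== Notes on version B (the rewrite author's own statement) =====
-- stated objective: alternative
-- what changed: Removes the binary search over time entirely: exact rational harmonic bounds (over the common denominator prod(cores)) pin the hand-out time of the nth job into a window containing only a handful of core-multiples, which are scanned directly for the unique candidate whose running totals straddle the target count, followed by a count-up scan over the cores.
-- outside the precondition, e.g. on solution(3, [-3, -2]): A returns 1, B returns None
import Mathlib
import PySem

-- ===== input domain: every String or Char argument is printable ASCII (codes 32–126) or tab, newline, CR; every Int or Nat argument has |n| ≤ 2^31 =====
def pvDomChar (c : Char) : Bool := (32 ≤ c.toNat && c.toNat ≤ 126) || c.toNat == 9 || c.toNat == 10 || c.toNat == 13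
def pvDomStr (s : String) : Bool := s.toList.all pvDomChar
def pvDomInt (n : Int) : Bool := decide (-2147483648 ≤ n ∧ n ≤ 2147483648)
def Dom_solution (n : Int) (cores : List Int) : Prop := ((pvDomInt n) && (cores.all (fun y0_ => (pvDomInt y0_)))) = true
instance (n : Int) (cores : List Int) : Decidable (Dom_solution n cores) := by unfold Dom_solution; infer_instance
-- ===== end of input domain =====

-- B removes A's binary search over time: exact harmonic bounds pin the nth hand-out time into a small window of core-multiples, scanned directly for the unique straddling candidate (alternative algorithm, similar cost).


-- ===== PORT A =====
-- count_jobs_done(time) = sum((time // core) + 1 for core in cores)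
def countJobs (cores : List Int) (time : Int) : Int :=
  (cores.map (fun core => PySem.Int.floordiv time core + 1)).sum

-- the `while left <= right` binary search (state: left, right, time_point)
def bsearch (n : Int) (cores : List Int) (left right tp : Int) : Int :=
  if left ≤ right then
    let mid := PySem.Int.floordiv (left + right) 2
    if n ≤ countJobs cores mid then
      bsearch n cores left (mid - 1) mid
    else
      bsearch n cores (mid + 1) right tp
  else tp
termination_by (right + 1 - left).toNat
decreasing_by
  · have h := PySem.Int.floordiv_two_mid_bounds (show left ≤ right by omega)
    omega
  · have h := PySem.Int.floordiv_two_mid_bounds (show left ≤ right by omega)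
    omega

-- the final `for idx, core in enumerate(cores)` scan (remaining counts down)
def pickA (t : Int) : Int → Int → List Int → Int
  | _, _, [] => 0  -- Python falls off the loop and returns None here; Pre_ excludes such inputs
  | remaining, idx, core :: rest =>
    if PySem.Int.mod t core = 0 then
      if remaining - 1 = 0 then idx + 1
      else pickA t (remaining - 1) (idx + 1) rest
    else pickA t remaining (idx + 1) rest

def solution (n : Int) (cores : List Int) : Int :=
  if n ≤ (cores.length : Int) then n
  else
    match PySem.List.max? cores id with
    | none => 0  -- Python: max([]) raises ValueError; Pre_ excludes
    | some mx =>
      let tp := bsearch n cores 0 (mx * n) 0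
      let wdb := (cores.map (fun core => PySem.Int.floordiv (tp - 1) core + 1)).sum
      pickA tp (n - wdb) 0 cores

-- ===== PORT B =====
-- sum(t // c for c in cores): the number of post-time-0 hand-outs up to time t
def jobsBy (cores : List Int) (t : Int) : Int :=
  (cores.map (fun c => PySem.Int.floordiv t c)).sum

-- the `for t in (...): if sum(..) >= N and sum(..) < N: T = t; break` scan (T = hi if never hit)
def findT (cores : List Int) (N hi : Int) : List Int → Int
  | [] => hi
  | t :: ts =>
    if N ≤ jobsBy cores t ∧ jobsBy cores (t - 1) < N then t
    else findT cores N hi ts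

-- the final `for i, c in enumerate(cores)` scan: award finishers in order, done counts UP
def scanTick (n t : Int) : Int → Int → List Int → Option Int × Int
  | _, done, [] => (none, done)
  | idx, done, c :: rest =>
    if PySem.Int.mod t c = 0 then
      if done + 1 = n then (some (idx + 1), done + 1)
      else scanTick n t (idx + 1) (done + 1) rest
    else scanTick n t (idx + 1) done rest

def solution_alt (n : Int) (cores : List Int) : Int :=
  if n ≤ (cores.length : Int) then n
  else
    let m : Int := (cores.length : Int)
    let N := n - m
    let D := cores.foldl (fun acc c => acc * c) 1
    let W := (cores.map (fun c => PySem.Int.floordiv D c)).sum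
    let lo := PySem.Int.floordiv (N * D + W - 1) W
    let hi := PySem.Int.floordiv ((N + m) * D + W - 1) W
    let T := findT cores N hi (cores.flatMap (fun c =>
      (PySem.List.pyRange (PySem.Int.floordiv (lo + c - 1) c)
        (PySem.Int.floordiv hi c + 1) 1).map (fun k => c * k)))
    let done1 := m + jobsBy cores (T - 1)
    match scanTick n T 0 done1 cores with
    | (some ans, _) => ans
    | (none, _) => 0  -- Python falls off the loop and returns None; Pre_ excludes

-- ===== PRECONDITION & SPEC =====
-- Pre_ excludes, when there are more jobs than cores, the empty core list (A raises ValueError),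
-- a core of 0 (A raises ZeroDivisionError) and negative core periods: negative job durations are
-- outside the natural domain — A's value there is an accident of the never-entered binary search
-- and B's empty candidate window returns no value there.
def Pre_solution (n : Int) (cores : List Int) : Prop :=
  n ≤ (cores.length : Int) ∨ (cores ≠ [] ∧ ∀ c ∈ cores, 0 < c)
instance (n : Int) (cores : List Int) : Decidable (Pre_solution n cores) := by unfold Pre_solution; infer_instance

def pvWitness_solution : Int × List Int := (7, [2, 3])

def Spec_solution (n : Int) (cores : List Int) (out : Int) : Prop := out = solution_alt n cores
instance (n : Int) (cores : List Int) (out : Int) : Decidable (Spec_solution n cores out) := by unfold Spec_solution; infer_instance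

-- ===== CLAIM (what is proved, stated in full; the proofs are below) =====
def Claim_equal_solution : Prop := ∀ (n : Int) (cores : List Int), Dom_solution n cores → Pre_solution n cores → Spec_solution n cores (solution n cores)

-- ===== LEMMAS AND PROOFS =====
-- number of cores finishing a job exactly at time t
def divCount (cores : List Int) (t : Int) : Int :=
  (cores.countP (fun c => decide (PySem.Int.mod t c = 0)) : Int)

theorem countJobs_mono {cores : List Int} (hpos : ∀ c ∈ cores, 0 < c) {t t' : Int} (h : t ≤ t') :
    countJobs cores t ≤ countJobs cores t' := by
  induction cores with
  | nil => simp [countJobs]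
  | cons c rest ih =>
    have hc := hpos c (by simp)
    have hrest := ih (fun x hx => hpos x (by simp [hx]))
    simp only [countJobs, List.map_cons, List.sum_cons] at *
    have : PySem.Int.floordiv t c ≤ PySem.Int.floordiv t' c := by
      rw [PySem.Int.floordiv_eq_ediv_of_pos hc, PySem.Int.floordiv_eq_ediv_of_pos hc]
      exact Int.ediv_le_ediv hc h
    omega

theorem countJobs_zero {cores : List Int} (hpos : ∀ c ∈ cores, 0 < c) :
    countJobs cores 0 = (cores.length : Int) := by
  induction cores with
  | nil => simp [countJobs]
  | cons c rest ih =>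
    have hc := hpos c (by simp)
    have hrest := ih (fun x hx => hpos x (by simp [hx]))
    simp only [countJobs, List.map_cons, List.sum_cons, List.length_cons] at *
    rw [PySem.Int.floordiv_eq_ediv_of_pos hc]
    simp [hrest]
    omega

theorem countJobs_nonneg {cores : List Int} (hpos : ∀ c ∈ cores, 0 < c) {t : Int} (ht : 0 ≤ t) :
    0 ≤ countJobs cores t := by
  have := countJobs_mono hpos ht
  have h0 := countJobs_zero hpos
  omega

theorem countJobs_big {cores : List Int} (hpos : ∀ c ∈ cores, 0 < c) (hne : cores ≠ [])
    {n M : Int} (hn : 1 ≤ n) (hM : ∀ c ∈ cores, c ≤ M) :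
    n ≤ countJobs cores (M * n) := by
  match cores, hne with
  | c :: rest, _ =>
    have hc := hpos c (by simp)
    have hcM := hM c (by simp)
    have hMn : 0 ≤ M * n := by nlinarith
    have hhead : n ≤ PySem.Int.floordiv (M * n) c := by
      rw [PySem.Int.le_floordiv_iff_mul_le hc]; nlinarith
    have hrest : 0 ≤ countJobs rest (M * n) :=
      countJobs_nonneg (fun x hx => hpos x (by simp [hx])) (by nlinarith)
    simp only [countJobs, List.map_cons, List.sum_cons] at *
    omega

theorem floordiv_pred {c : Int} (hc : 0 < c) (t : Int) :
    PySem.Int.floordiv t c =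
      PySem.Int.floordiv (t - 1) c + (if PySem.Int.mod t c = 0 then 1 else 0) := by
  have hq := PySem.Int.floordiv_mul_add_mod t c
  have hr0 := PySem.Int.mod_nonneg t hc
  have hrc := PySem.Int.mod_lt t hc
  set q := PySem.Int.floordiv t c with hqdef
  set r := PySem.Int.mod t c with hrdef
  by_cases hr : r = 0
  · have : PySem.Int.floordiv (t - 1) c = q - 1 := by
      rw [PySem.Int.floordiv_eq_iff_of_pos hc]
      constructor <;> nlinarith
    simp [hr, this]
  · have hr1 : 1 ≤ r := by omega
    have : PySem.Int.floordiv (t - 1) c = q := by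
      rw [PySem.Int.floordiv_eq_iff_of_pos hc]
      constructor <;> nlinarith
    simp [hr, this]

theorem countJobs_succ {cores : List Int} (hpos : ∀ c ∈ cores, 0 < c) (t : Int) :
    countJobs cores t = countJobs cores (t - 1) + divCount cores t := by
  induction cores with
  | nil => simp [countJobs, divCount]
  | cons c rest ih =>
    have hc := hpos c (by simp)
    have hrest := ih (fun x hx => hpos x (by simp [hx]))
    have hd := floordiv_pred hc t
    simp only [countJobs, divCount, List.map_cons, List.sum_cons, List.countP_cons] at hrest ⊢
    by_cases hm : PySem.Int.mod t c = 0 <;>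
      simp only [hm, if_true, if_false, decide_true, decide_false] at hd ⊢ <;>
      push_cast <;> omega

theorem scan_some (n t : Int) (l : List Int) : ∀ idx done : Int,
    1 ≤ n - done → n - done ≤ divCount l t →
    (scanTick n t idx done l).1 = some (pickA t (n - done) idx l) := by
  induction l with
  | nil => intro idx done h1 h2; simp [divCount] at h2; omega
  | cons c rest ih =>
    intro idx done h1 h2
    simp only [divCount, List.countP_cons] at h2
    by_cases hm : PySem.Int.mod t c = 0
    · by_cases hlast : done + 1 = n
      · have : n - done - 1 = 0 := by omega
        simp [scanTick, pickA, hm, hlast, this]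
      · have h1' : 1 ≤ n - (done + 1) := by omega
        have h2' : n - (done + 1) ≤ divCount rest t := by
          simp [hm, divCount] at *; omega
        have hrec := ih (idx + 1) (done + 1) h1' h2'
        have harg : n - done - 1 = n - (done + 1) := by ring
        simp [scanTick, pickA, hm, hlast, harg, hrec]
        exact fun h => absurd h (by omega)
    · have h2' : n - done ≤ divCount rest t := by
        simp [hm, divCount] at *; omega
      simp [scanTick, pickA, hm, ih (idx + 1) done h1 h2']

theorem bsearch_eq {n : Int} {cores : List Int} (hpos : ∀ c ∈ cores, 0 < c)
    {T R0 : Int} (hT0 : 0 ≤ T) (hTge : n ≤ countJobs cores T)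
    (hTmin : ∀ s, 0 ≤ s → s < T → countJobs cores s < n)
    (hR0 : 0 ≤ R0) (hR0ge : n ≤ countJobs cores R0) :
    ∀ (left right tp : Int), 0 ≤ left →
    (∀ s, 0 ≤ s → s < left → countJobs cores s < n) →
    ((n ≤ countJobs cores tp ∧ 0 ≤ tp ∧ tp = right + 1) ∨ (tp = 0 ∧ right = R0)) →
    bsearch n cores left right tp = T := by
  intro left right tp
  induction left, right, tp using bsearch.induct n cores with
  | case1 left right tp hlr mid hge ih =>
    intro hl0 hinv hcase
    have hmid : left ≤ mid ∧ mid ≤ right := PySem.Int.floordiv_two_mid_bounds hlr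
    have hstep : bsearch n cores left right tp = bsearch n cores left (mid - 1) mid := by
      conv_lhs => rw [bsearch]
      rw [if_pos hlr]
      exact if_pos hge
    rw [hstep]
    exact ih hl0 hinv (Or.inl ⟨hge, by omega, by ring⟩)
  | case2 left right tp hlr mid hge ih =>
    intro hl0 hinv hcase
    have hmid : left ≤ mid ∧ mid ≤ right := PySem.Int.floordiv_two_mid_bounds hlr
    have hstep : bsearch n cores left right tp = bsearch n cores (mid + 1) right tp := by
      conv_lhs => rw [bsearch]
      rw [if_pos hlr]
      exact if_neg hge
    rw [hstep]
    refine ih (by omega) (fun s hs0 hs => ?_) hcase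
    by_cases hsl : s < left
    · exact hinv s hs0 hsl
    · have h1 : s ≤ mid := by omega
      have h2 : countJobs cores mid < n := by omega
      exact lt_of_le_of_lt (countJobs_mono hpos h1) h2
  | case3 left right tp hlr =>
    intro hl0 hinv hcase
    rw [bsearch, if_neg hlr]
    rcases hcase with ⟨htp_ge, htp0, htp⟩ | ⟨htp, hright⟩
    · rcases lt_trichotomy tp T with h | h | h
      · exact absurd htp_ge (by have := hTmin tp htp0 h; omega)
      · exact h
      · exact absurd hTge (by have := hinv T hT0 (by omega); omega)
    · exact absurd hR0ge (by have := hinv R0 hR0 (by omega); omega)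

theorem max?_some {cores : List Int} (hne : cores ≠ []) :
    ∃ mx, PySem.List.max? cores id = some mx := by
  cases h : PySem.List.max? cores id with
  | none => exact absurd ((PySem.List.max?_eq_none_iff cores id).mp h) hne
  | some mx => exact ⟨mx, rfl⟩

-- ---- B-side lemmas ----

-- countJobs is jobsBy plus the number of cores
theorem countJobs_eq_jobsBy (cores : List Int) (t : Int) :
    countJobs cores t = jobsBy cores t + (cores.length : Int) := by
  induction cores with
  | nil => simp [countJobs, jobsBy]
  | cons c rest ih =>
    simp only [countJobs, jobsBy, List.map_cons, List.sum_cons, List.length_cons] at *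
    push_cast
    omega

-- the foldl product is List.prod
theorem foldl_mul_eq (l : List Int) : ∀ a : Int, l.foldl (fun acc c => acc * c) a = a * l.prod := by
  induction l with
  | nil => intro a; simp
  | cons c rest ih => intro a; simp [List.foldl_cons, ih, List.prod_cons]; ring

-- each term D//c is a positive exact quotient
theorem fdivD_exact {D c : Int} (hD : 0 < D) (hc : 0 < c) (hdvd : c ∣ D) :
    PySem.Int.floordiv D c * c = D ∧ 1 ≤ PySem.Int.floordiv D c := by
  constructor
  · rw [PySem.Int.floordiv_eq_ediv_of_pos hc]
    exact Int.ediv_mul_cancel hdvd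
  · rw [PySem.Int.le_floordiv_iff_mul_le hc, one_mul]
    exact Int.le_of_dvd hD hdvd

-- harmonic bounds: D·S(t) ≤ t·W and t·W ≤ D·S(t) + m·D - W, with W = Σ D/c
theorem harmonic_bounds {cores : List Int} {D : Int} (hD : 0 < D)
    (h : ∀ c ∈ cores, 0 < c ∧ c ∣ D) (t : Int) :
    D * jobsBy cores t ≤ t * (cores.map (fun c => PySem.Int.floordiv D c)).sum ∧
    t * (cores.map (fun c => PySem.Int.floordiv D c)).sum ≤
      D * jobsBy cores t + (cores.length : Int) * D -
        (cores.map (fun c => PySem.Int.floordiv D c)).sum := by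
  induction cores with
  | nil => simp [jobsBy]
  | cons c rest ih =>
    obtain ⟨hc, hdvd⟩ := h c (by simp)
    obtain ⟨hex, hu1⟩ := fdivD_exact hD hc hdvd
    obtain ⟨ih1, ih2⟩ := ih (fun x hx => h x (by simp [hx]))
    have hq1 : PySem.Int.floordiv t c * c ≤ t := by
      have := (PySem.Int.le_floordiv_iff_mul_le hc
        (q := PySem.Int.floordiv t c) (a := t)).mp le_rfl
      exact this
    have hq2 : t < (PySem.Int.floordiv t c + 1) * c := by
      have := (PySem.Int.floordiv_lt_iff_lt_mul hc
        (a := t) (q := PySem.Int.floordiv t c + 1)).mp (by omega)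
      exact this
    simp only [jobsBy, List.map_cons, List.sum_cons, List.length_cons] at *
    set q := PySem.Int.floordiv t c with hqd
    set u := PySem.Int.floordiv D c with hud
    have hu0 : (0:Int) ≤ u := by rw [hud]; linarith [hu1]
    constructor
    · have h1 := mul_le_mul_of_nonneg_left hq1 hu0
      have hkey : D * q ≤ t * u := by rw [← hex, hud] at *; nlinarith [h1]
      nlinarith [hkey, ih1]
    · have h2 := mul_le_mul_of_nonneg_right
        (show t ≤ q * c + c - 1 by nlinarith [hq2]) hu0
      have hkey : t * u ≤ D * q + D - u := by rw [← hex, hud] at *; nlinarith [h2]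
      push_cast
      nlinarith [hkey, ih2]

theorem W_pos {cores : List Int} {D : Int} (hD : 0 < D)
    (h : ∀ c ∈ cores, 0 < c ∧ c ∣ D) :
    (cores.length : Int) ≤ (cores.map (fun c => PySem.Int.floordiv D c)).sum := by
  induction cores with
  | nil => simp
  | cons c rest ih =>
    obtain ⟨hc, hdvd⟩ := h c (by simp)
    have h1 := (fdivD_exact hD hc hdvd).2
    have hrest := ih (fun x hx => h x (by simp [hx]))
    simp only [List.map_cons, List.sum_cons, List.length_cons]
    push_cast
    omega

-- ceil identity: (x + c - 1) // c = (x - 1) // c + 1 for 0 < c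
theorem fdiv_ceil_eq {c : Int} (hc : 0 < c) (x : Int) :
    PySem.Int.floordiv (x + c - 1) c = PySem.Int.floordiv (x - 1) c + 1 := by
  obtain ⟨h1, h2⟩ := (PySem.Int.floordiv_eq_iff_of_pos hc).mp
    (rfl : PySem.Int.floordiv (x - 1) c = PySem.Int.floordiv (x - 1) c)
  rw [PySem.Int.floordiv_eq_iff_of_pos hc]
  constructor <;> nlinarith

theorem fdiv_mono {c : Int} (hc : 0 < c) {t t' : Int} (h : t ≤ t') :
    PySem.Int.floordiv t c ≤ PySem.Int.floordiv t' c := by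
  rw [PySem.Int.floordiv_eq_ediv_of_pos hc, PySem.Int.floordiv_eq_ediv_of_pos hc]
  exact Int.ediv_le_ediv hc h

theorem events_mem_bounds {cores : List Int} (hpos : ∀ c ∈ cores, 0 < c) (lo hi : Int) :
    ∀ e ∈ cores.flatMap (fun c =>
        (PySem.List.pyRange (PySem.Int.floordiv (lo + c - 1) c)
          (PySem.Int.floordiv hi c + 1) 1).map (fun k => c * k)),
      lo ≤ e ∧ e ≤ hi := by
  intro e he
  rw [List.mem_flatMap] at he
  obtain ⟨c, hcmem, he⟩ := he
  rw [List.mem_map] at he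
  obtain ⟨k, hk, rfl⟩ := he
  have hc := hpos c hcmem
  rw [PySem.List.mem_pyRange_one] at hk
  obtain ⟨hk1, hk2⟩ := hk
  rw [fdiv_ceil_eq hc] at hk1
  obtain ⟨hq1, hq2⟩ := (PySem.Int.floordiv_eq_iff_of_pos hc).mp
    (rfl : PySem.Int.floordiv (lo - 1) c = PySem.Int.floordiv (lo - 1) c)
  have hhi : PySem.Int.floordiv hi c * c ≤ hi :=
    (PySem.Int.le_floordiv_iff_mul_le hc).mp le_rfl
  constructor
  · nlinarith
  · have hk2' : k ≤ PySem.Int.floordiv hi c := by omega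
    nlinarith

-- the scan returns T when T is in the list, satisfies the straddle, and is the only one to
theorem findT_eq (cores : List Int) (N hi T : Int) : ∀ l : List Int,
    (∀ t ∈ l, N ≤ jobsBy cores t ∧ jobsBy cores (t - 1) < N → t = T) →
    T ∈ l → (N ≤ jobsBy cores T ∧ jobsBy cores (T - 1) < N) →
    findT cores N hi l = T := by
  intro l
  induction l with
  | nil => intro _ hT _; simp at hT
  | cons t ts ih =>
    intro huniq hT hcond
    by_cases hc : N ≤ jobsBy cores t ∧ jobsBy cores (t - 1) < N
    · simp only [findT, if_pos hc]
      exact huniq t (by simp) hc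
    · have hTts : T ∈ ts := by
        rcases List.mem_cons.mp hT with h | h
        · exact absurd (by rw [h] at hcond; exact hcond) hc
        · exact h
      simp only [findT, if_neg hc]
      exact ih (fun t' ht' => huniq t' (by simp [ht'])) hTts hcond

-- a multiple of a core inside [lo, hi] is among the candidates
theorem mem_events {cores : List Int} (hpos : ∀ c ∈ cores, 0 < c) {lo hi T : Int}
    (hlo : lo ≤ T) (hhi : T ≤ hi) {c : Int} (hcmem : c ∈ cores)
    (hmd : PySem.Int.mod T c = 0) :
    T ∈ cores.flatMap (fun c =>
        (PySem.List.pyRange (PySem.Int.floordiv (lo + c - 1) c)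
          (PySem.Int.floordiv hi c + 1) 1).map (fun k => c * k)) := by
  have hc := hpos c hcmem
  have hdvd : c ∣ T := (PySem.Int.mod_eq_zero_iff_dvd T c).mp hmd
  have hck : PySem.Int.floordiv T c * c = T := by
    rw [PySem.Int.floordiv_eq_ediv_of_pos hc]
    exact Int.ediv_mul_cancel hdvd
  refine List.mem_flatMap.mpr ⟨c, hcmem, List.mem_map.mpr
    ⟨PySem.Int.floordiv T c, ?_, by rw [mul_comm]; exact hck⟩⟩
  rw [PySem.List.mem_pyRange_one]
  obtain ⟨hq1, hq2⟩ := (PySem.Int.floordiv_eq_iff_of_pos hc).mp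
    (rfl : PySem.Int.floordiv (lo - 1) c = PySem.Int.floordiv (lo - 1) c)
  constructor
  · rw [fdiv_ceil_eq hc]
    by_contra h
    have hk : PySem.Int.floordiv T c ≤ PySem.Int.floordiv (lo - 1) c := by omega
    nlinarith
  · have hk : PySem.Int.floordiv T c ≤ PySem.Int.floordiv hi c := by
      rw [PySem.Int.le_floordiv_iff_mul_le hc, hck]
      exact hhi
    omega

-- ===== VERDICT (by name: the statement is the Claim_ definition above) =====
theorem solution_spec : Claim_equal_solution := by
  intro n cores _ hpre
  unfold Spec_solution
  by_cases hguard : n ≤ (cores.length : Int)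
  · simp [solution, solution_alt, hguard]
  · rcases hpre with h | ⟨hne, hpos⟩
    · exact absurd h hguard
    have hn1 : 1 ≤ n := by
      have : cores.length ≠ 0 := by simpa using hne
      omega
    obtain ⟨mx, hmx⟩ := max?_some hne
    have hmx_ub : ∀ c ∈ cores, c ≤ mx := by
      intro c hc; simpa using PySem.List.max?_isMax hmx c hc
    have hmx_pos : 0 < mx := by
      match cores, hne with
      | c :: rest, _ => exact lt_of_lt_of_le (hpos c (by simp)) (hmx_ub c (by simp))
    -- T : the least time at which at least n jobs are done
    have hex : ∃ k : Nat, n ≤ countJobs cores ((k : Nat) : Int) := by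
      refine ⟨(mx * n).toNat, ?_⟩
      have hnn : 0 ≤ mx * n := by positivity
      rw [Int.toNat_of_nonneg hnn]
      exact countJobs_big hpos hne hn1 hmx_ub
    classical
    let TN := Nat.find hex
    set T : Int := (TN : Int) with hTdef
    have hTge : n ≤ countJobs cores T := Nat.find_spec hex
    have hTmin : ∀ s, 0 ≤ s → s < T → countJobs cores s < n := by
      intro s hs0 hsT
      have := Nat.find_min hex (m := s.toNat) (by omega)
      rw [Int.toNat_of_nonneg hs0] at this
      omega
    have hT0 : 0 ≤ T := by positivity
    -- A computes pickA T (n - countJobs cores (T-1)) 0 cores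
    have hA : solution n cores = pickA T (n - countJobs cores (T - 1)) 0 cores := by
      have hbs : bsearch n cores 0 (mx * n) 0 = T :=
        bsearch_eq hpos hT0 hTge hTmin (by positivity)
          (countJobs_big hpos hne hn1 hmx_ub) 0 (mx * n) 0 le_rfl
          (fun s hs0 hs => absurd hs0 (by omega))
          (Or.inr ⟨rfl, rfl⟩)
      simp only [solution, hguard, if_false, hmx, hbs]
      rfl
    -- ---- B side ----
    have hm1 : 1 ≤ (cores.length : Int) := by
      have : cores.length ≠ 0 := by simpa using hne
      omega
    set N' : Int := n - (cores.length : Int) with hN'def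
    have hN1 : 1 ≤ N' := by omega
    set D : Int := cores.prod with hDdef
    have hDfold : cores.foldl (fun acc c => acc * c) 1 = D := by
      rw [foldl_mul_eq]; simp [hDdef]
    have hDpos : 0 < D := List.prod_pos hpos
    have hcd : ∀ c ∈ cores, 0 < c ∧ c ∣ D := fun c hc => ⟨hpos c hc, List.dvd_prod hc⟩
    set W : Int := (cores.map (fun c => PySem.Int.floordiv D c)).sum with hWdef
    have hWm : (cores.length : Int) ≤ W := W_pos hDpos hcd
    have hWpos : 0 < W := by omega
    set lo : Int := PySem.Int.floordiv (N' * D + W - 1) W with hlodef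
    set hi : Int := PySem.Int.floordiv ((N' + (cores.length : Int)) * D + W - 1) W with hhidef
    have hbridge : ∀ t, countJobs cores t = jobsBy cores t + (cores.length : Int) :=
      fun t => countJobs_eq_jobsBy cores t
    -- lo ≤ T, 1 ≤ lo, S(lo-1) < N'
    have hST : N' ≤ jobsBy cores T := by have := hbridge T; omega
    have hh1 := (harmonic_bounds hDpos hcd T).1
    have hNDTW : N' * D ≤ T * W := by nlinarith [mul_le_mul_of_nonneg_right hST (le_of_lt hDpos)]
    have hloT : lo ≤ T := by
      have hlt : lo < T + 1 := by
        rw [hlodef, PySem.Int.floordiv_lt_iff_lt_mul hWpos]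
        nlinarith
      omega
    have hlo1 : 1 ≤ lo := by
      rw [hlodef, PySem.Int.le_floordiv_iff_mul_le hWpos]
      nlinarith
    have hSlo : jobsBy cores (lo - 1) < N' := by
      have h := hTmin (lo - 1) (by omega) (by omega)
      have := hbridge (lo - 1); omega
    -- N' ≤ S(hi), T ≤ hi
    have hhiW : (N' + (cores.length : Int)) * D ≤ hi * W := by
      have h1 := PySem.Int.floordiv_mul_add_mod ((N' + (cores.length : Int)) * D + W - 1) W
      have h2 := PySem.Int.mod_nonneg ((N' + (cores.length : Int)) * D + W - 1) hWpos
      have h3 := PySem.Int.mod_lt ((N' + (cores.length : Int)) * D + W - 1) hWpos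
      rw [hhidef]
      omega
    have hShi : N' ≤ jobsBy cores hi := by
      have hh2 := (harmonic_bounds hDpos hcd hi).2
      nlinarith [hhiW, hh2]
    have hhilo : lo ≤ hi := by
      rw [hlodef, hhidef]
      apply fdiv_mono hWpos
      nlinarith
    have hThi : T ≤ hi := by
      by_contra hcon
      have h := hTmin hi (by omega) (by omega)
      have := hbridge hi
      omega
    have hT1 : 1 ≤ T := by
      by_contra h
      have hz : T = 0 := by omega
      rw [hz, countJobs_zero hpos] at hTge
      omega
    -- the candidate multiples
    set cand : List Int := cores.flatMap (fun c =>
        (PySem.List.pyRange (PySem.Int.floordiv (lo + c - 1) c)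
          (PySem.Int.floordiv hi c + 1) 1).map (fun k => c * k)) with hcand
    have hbounds : ∀ e ∈ cand, lo ≤ e ∧ e ≤ hi := fun e he =>
      events_mem_bounds hpos lo hi e he
    -- T satisfies the straddle condition
    have hST1 : jobsBy cores (T - 1) < N' := by
      have h := hTmin (T - 1) (by omega) (by omega)
      have := hbridge (T - 1); omega
    -- some core finishes exactly at T, so T is a candidate
    have hTmem : T ∈ cand := by
      have hdc : 0 < divCount cores T := by
        have hs := countJobs_succ hpos T
        have h1 := hbridge T
        have h2 := hbridge (T - 1)
        omega
      have hdc' : 0 < cores.countP (fun c => decide (PySem.Int.mod T c = 0)) := by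
        unfold divCount at hdc
        omega
      obtain ⟨c, hcmem, hmd⟩ := List.countP_pos_iff.mp hdc'
      exact mem_events hpos hloT hThi hcmem (of_decide_eq_true hmd)
    -- T is the only candidate satisfying the straddle
    have huniq : ∀ t ∈ cand, N' ≤ jobsBy cores t ∧ jobsBy cores (t - 1) < N' → t = T := by
      rintro t ht ⟨h1, h2⟩
      obtain ⟨htlo, hthi⟩ := hbounds t ht
      have hge : n ≤ countJobs cores t := by have := hbridge t; omega
      have hlt : countJobs cores (t - 1) < n := by have := hbridge (t - 1); omega
      have ha : T ≤ t := by
        by_contra hcon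
        have := hTmin t (by omega) (by omega)
        omega
      have hb : t ≤ T := by
        by_contra hcon
        have := countJobs_mono hpos (show T ≤ t - 1 by omega)
        omega
      omega
    have hfind : findT cores N' hi cand = T := findT_eq cores N' hi T cand huniq hTmem ⟨hST, hST1⟩
    -- B computes the same pick
    have hB : solution_alt n cores = pickA T (n - countJobs cores (T - 1)) 0 cores := by
      have hr1 : 1 ≤ n - countJobs cores (T - 1) := by
        have := hbridge (T - 1)
        omega
      have hr2 : n - countJobs cores (T - 1) ≤ divCount cores T := by
        have hs := countJobs_succ hpos T
        have := hbridge T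
        omega
      have hscan := scan_some n T cores 0 (countJobs cores (T - 1)) (by omega) (by omega)
      rcases hs : scanTick n T 0 (countJobs cores (T - 1)) cores with ⟨o, d⟩
      rw [hs] at hscan
      simp at hscan
      simp only [solution_alt, hguard, if_false, hDfold]
      simp only [← hN'def, ← hWdef, ← hlodef, ← hhidef, ← hcand, hfind]
      have hdone1 : (cores.length : Int) + jobsBy cores (T - 1) = countJobs cores (T - 1) := by
        have := hbridge (T - 1); omega
      rw [hdone1, hs, hscan]
    rw [hA, hB]
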